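-- pv_equiv track=rewrite | github.com/PavcaHyx/Advent-of-Code-2021 | day_1/day_1.py | get_count_of_increased_triplets
-- ===== SOURCE A (Python) =====
-- def get_count_of_increased_triplets(measurements) -> int:
--     """
--         Count how many sequent increases are between triplets.
--         Compare a sum of each triplet to determine increase / decrease.
--         Triples are made as follow:
--             199  A
--             200  A B
--             208  A B C
--             210    B C D
--             200  E   C D
--             207  E F   D
--             240  E F G
--             269    F G H
--             260      G H
--             263        H
--         Args:
--             measurements (List[int]): list of measurements
--         Returns:
--             int: number of sequent increases between triplets
--     """
--     if len(measurements) < 6: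
--         raise ValueError("List contains less than 6 values to compare")
--
--     count_of_increased_triplets = 0
--
--     list_of_sum_of_three_items = []
--     for i in range(len(measurements)-2):
--         sum_of_three_items = (int(measurements[i]) + int(measurements[i+1]) + int(measurements[i+2]))
--         list_of_sum_of_three_items.append(sum_of_three_items)
--
--     for i in range(len(list_of_sum_of_three_items) - 1):
--         if int(list_of_sum_of_three_items[i + 1]) > int(list_of_sum_of_three_items[i]):
--             count_of_increased_triplets += 1
--     return count_of_increased_triplets
-- ===== SOURCE B (Python) =====
-- def get_count_of_increased_triplets(measurements) -> int:
--     if len(measurements) < 6: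
--         raise ValueError("List contains less than 6 values to compare")
--     count = 0
--     for i in range(len(measurements) - 3):
--         if int(measurements[i + 3]) > int(measurements[i]):
--             count += 1
--     return count
-- ===== Notes on version B (the rewrite author's own statement) =====
-- stated objective: simpler
-- what changed: Drops the intermediate triplet-sum list entirely: since adjacent window sums share two elements, sums[i+1] > sums[i] iff measurements[i+3] > measurements[i], so B is a single counting loop comparing elements three apart.
import Mathlib
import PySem

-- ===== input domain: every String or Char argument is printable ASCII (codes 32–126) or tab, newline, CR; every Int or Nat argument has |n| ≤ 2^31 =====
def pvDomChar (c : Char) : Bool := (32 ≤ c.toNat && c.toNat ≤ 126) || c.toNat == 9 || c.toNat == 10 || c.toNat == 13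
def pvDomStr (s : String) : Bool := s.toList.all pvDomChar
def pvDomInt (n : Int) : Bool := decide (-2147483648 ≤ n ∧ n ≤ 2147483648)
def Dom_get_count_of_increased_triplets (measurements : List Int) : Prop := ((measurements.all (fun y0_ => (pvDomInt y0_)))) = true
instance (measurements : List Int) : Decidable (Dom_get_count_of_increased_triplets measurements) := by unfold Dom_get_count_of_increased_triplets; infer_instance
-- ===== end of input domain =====

-- B replaces A's intermediate triplet-sum list with a single loop comparing elements three apart
-- (sums[i+1] > sums[i] iff m[i+3] > m[i]); objective: simpler (same asymptotic cost, one pass, O(1) space).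

-- ===== PORT A =====
-- On len < 6 the Python raises ValueError; that case is excluded by Pre_ and the port returns 0 there.
def get_count_of_increased_triplets (measurements : List Int) : Int :=
  if (measurements.length : Int) < 6 then 0 else
    let sums := (PySem.List.pyRange 0 ((measurements.length : Int) - 2) 1).foldl
      (fun acc i => acc ++ [PySem.List.pyGetD measurements i 0 +
        PySem.List.pyGetD measurements (i+1) 0 + PySem.List.pyGetD measurements (i+2) 0]) []
    (PySem.List.pyRange 0 ((sums.length : Int) - 1) 1).foldl
      (fun c i => if PySem.List.pyGetD sums (i+1) 0 > PySem.List.pyGetD sums i 0 then c + 1 else c) 0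

-- ===== PORT B =====
def get_count_of_increased_triplets_alt (measurements : List Int) : Int :=
  if (measurements.length : Int) < 6 then 0 else
    (PySem.List.pyRange 0 ((measurements.length : Int) - 3) 1).foldl
      (fun c i => if PySem.List.pyGetD measurements (i+3) 0 > PySem.List.pyGetD measurements i 0 then c + 1 else c) 0

-- ===== PRECONDITION & SPEC =====
-- Pre_ excludes exactly the inputs (fewer than 6 measurements) on which the Python A raises ValueError.
def Pre_get_count_of_increased_triplets (measurements : List Int) : Prop := 6 ≤ measurements.length
instance (measurements : List Int) : Decidable (Pre_get_count_of_increased_triplets measurements) := by unfold Pre_get_count_of_increased_triplets; infer_instance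
def pvWitness_get_count_of_increased_triplets : List Int := [199, 200, 208, 210, 200, 207, 240, 269, 260, 263]

def Spec_get_count_of_increased_triplets (measurements : List Int) (out : Int) : Prop := out = get_count_of_increased_triplets_alt measurements
instance (measurements : List Int) (out : Int) : Decidable (Spec_get_count_of_increased_triplets measurements out) := by unfold Spec_get_count_of_increased_triplets; infer_instance

-- ===== CLAIM (what is proved, stated in full; the proofs are below) =====
def Claim_equal_get_count_of_increased_triplets : Prop := ∀ (measurements : List Int), Dom_get_count_of_increased_triplets measurements → Pre_get_count_of_increased_triplets measurements → Spec_get_count_of_increased_triplets measurements (get_count_of_increased_triplets measurements)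

-- ===== LEMMAS AND PROOFS =====

-- ===== VERDICT (by name: the statement is the Claim_ definition above) =====
theorem get_count_of_increased_triplets_spec : Claim_equal_get_count_of_increased_triplets := by
  intro m _ hpre
  unfold Pre_get_count_of_increased_triplets at hpre
  unfold Spec_get_count_of_increased_triplets
  unfold get_count_of_increased_triplets get_count_of_increased_triplets_alt
  have h6 : ¬ ((m.length : Int) < 6) := by
    have : (6:Int) ≤ (m.length : Int) := by exact_mod_cast hpre
    omega
  simp only [h6, if_false]
  set n : Int := (m.length : Int) with hn
  have hsums : (PySem.List.pyRange 0 (n - 2) 1).foldl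
      (fun acc i => acc ++ [PySem.List.pyGetD m i 0 +
        PySem.List.pyGetD m (i+1) 0 + PySem.List.pyGetD m (i+2) 0]) []
      = (PySem.List.pyRange 0 (n - 2) 1).map
        (fun i => PySem.List.pyGetD m i 0 + PySem.List.pyGetD m (i+1) 0 + PySem.List.pyGetD m (i+2) 0) := by
    simpa using PySem.List.foldl_append_singleton_eq_map
      (fun i => PySem.List.pyGetD m i 0 + PySem.List.pyGetD m (i+1) 0 + PySem.List.pyGetD m (i+2) 0)
      (PySem.List.pyRange 0 (n - 2) 1) []
  rw [hsums]
  set f : Int → Int := fun i => PySem.List.pyGetD m i 0 + PySem.List.pyGetD m (i+1) 0 + PySem.List.pyGetD m (i+2) 0 with hf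
  have hlen : ((((PySem.List.pyRange 0 (n - 2) 1).map f).length : Int) - 1) = n - 3 := by
    rw [List.length_map, PySem.List.length_pyRange_one]
    have hge : (6 : Int) ≤ n := by rw [hn]; exact_mod_cast hpre
    omega
  rw [hlen]
  apply PySem.List.foldl_congr_mem
  intro acc i hi
  rw [PySem.List.mem_pyRange_one] at hi
  have hge : (6 : Int) ≤ n := by rw [hn]; exact_mod_cast hpre
  -- rewrite n - 2 as a Nat cast to use pyGetD_map_pyRange
  have hn2 : n - 2 = ((m.length - 2 : Nat) : Int) := by omega
  have hget : ∀ j : Int, 0 ≤ j → j < n - 2 →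
      PySem.List.pyGetD ((PySem.List.pyRange 0 (n - 2) 1).map f) j 0 = f j := by
    intro j hj0 hj1
    have hjn : j = ((j.toNat : Nat) : Int) := by omega
    have hk : j.toNat < m.length - 2 := by omega
    rw [hn2, hjn]
    simpa using PySem.List.pyGetD_map_pyRange f (m.length - 2) j.toNat 0 hk
  rw [hget i hi.1 (by omega), hget (i+1) (by omega) (by omega)]
  rw [hf]
  simp only [show i + 1 + 1 = i + 2 from by ring, show i + 1 + 2 = i + 3 from by ring]
  set a := PySem.List.pyGetD m i 0
  set b := PySem.List.pyGetD m (i+1) 0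
  set c := PySem.List.pyGetD m (i+2) 0
  set d := PySem.List.pyGetD m (i+3) 0
  split_ifs with h1 h2 h3 <;> omega
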